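-- pv_equiv track=rewrite | github.com/jpsamuelson/aurora-icepower-booster | scripts/replace_j2_add_j15.py | check_bracket_balance
-- ===== SOURCE A (Python) =====
-- def check_bracket_balance(text):
--     depth = 0
--     for ch in text:
--         if ch == '(':
--             depth += 1
--         elif ch == ')':
--             depth -= 1
--     return depth
-- ===== SOURCE B (Python) =====
-- def check_bracket_balance(text):
--     return text.count('(') - text.count(')')
-- ===== Notes on version B (the rewrite author's own statement) =====
-- stated objective: faster
-- what changed: Replaces the per-character accumulator loop with two whole-text substring counts via str.count (one per parenthesis kind) and a single subtraction, moving the scans into C-level library calls.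
import Mathlib
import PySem

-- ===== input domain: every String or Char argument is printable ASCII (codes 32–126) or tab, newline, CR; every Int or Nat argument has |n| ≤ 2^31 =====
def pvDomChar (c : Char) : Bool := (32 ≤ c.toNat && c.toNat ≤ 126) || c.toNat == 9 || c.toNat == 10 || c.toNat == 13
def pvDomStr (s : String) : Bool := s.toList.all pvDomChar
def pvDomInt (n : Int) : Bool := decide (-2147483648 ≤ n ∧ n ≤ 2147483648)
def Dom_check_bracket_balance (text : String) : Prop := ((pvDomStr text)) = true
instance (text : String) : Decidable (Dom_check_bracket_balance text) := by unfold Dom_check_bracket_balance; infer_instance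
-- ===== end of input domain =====

-- B replaces A's per-character depth accumulator with two whole-text substring counts and one subtraction (simpler decomposition).

-- ===== PORT A =====
-- depth = 0; for ch in text: if ch == '(': depth += 1 elif ch == ')': depth -= 1; return depth
def check_bracket_balance (text : String) : Int :=
  text.toList.foldl
    (fun depth ch =>
      if ch == '(' then depth + 1
      else if ch == ')' then depth - 1
      else depth) 0

-- ===== PORT B =====
-- return text.count('(') - text.count(')')
def check_bracket_balance_alt (text : String) : Int :=
  (PySem.Str.count text "(" : Int) - (PySem.Str.count text ")" : Int)

-- ===== PRECONDITION & SPEC =====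
def Spec_check_bracket_balance (text : String) (out : Int) : Prop := out = check_bracket_balance_alt text
instance (text : String) (out : Int) : Decidable (Spec_check_bracket_balance text out) := by unfold Spec_check_bracket_balance; infer_instance

-- ===== CLAIM (what is proved, stated in full; the proofs are below) =====
def Claim_equal_check_bracket_balance : Prop := ∀ (text : String), Dom_check_bracket_balance text → Spec_check_bracket_balance text (check_bracket_balance text)

-- ===== LEMMAS AND PROOFS =====

-- Python's str.count with a single-character needle (no overlaps possible) is List.count.
theorem pv_count_go_single (c : Char) : ∀ (fuel : Nat) (s : List Char) (acc : Nat), s.length ≤ fuel →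
    PySem.Chars.count.go [c] fuel s acc = acc + s.count c := by
  intro fuel
  induction fuel with
  | zero => intro s acc h; simp at h; simp [h, PySem.Chars.count.go]
  | succ n ih =>
    intro s acc h
    cases s with
    | nil => simp [PySem.Chars.count.go]
    | cons a t =>
      have ht : t.length ≤ n := by simpa using h
      by_cases hc : c = a
      · subst hc
        simp only [PySem.Chars.count.go, List.isPrefixOf, beq_self_eq_true, Bool.true_and]
        simp [ih t (acc + 1) ht]
        omega
      · have hp : [c].isPrefixOf (a :: t) = false := by
          simp [List.isPrefixOf]; exact fun h' => hc (by simpa using h')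
        simp only [PySem.Chars.count.go, hp]
        simp [ih t acc ht, Ne.symm hc]

theorem pv_count_single (s : List Char) (c : Char) : PySem.Chars.count s [c] = s.count c := by
  simp [PySem.Chars.count, pv_count_go_single c s.length s 0 le_rfl]

-- A's running-depth fold equals (#'(' − #')') via a generalized accumulator invariant.
theorem pv_fold_eq (s : List Char) : ∀ (d : Int),
    s.foldl (fun depth ch => if ch == '(' then depth + 1 else if ch == ')' then depth - 1 else depth) d
      = d + (s.count '(' : Int) - (s.count ')' : Int) := by
  induction s with
  | nil => intro d; simp
  | cons a t ih =>
    intro d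
    simp only [List.foldl_cons, ih, List.count_cons]
    by_cases h1 : a = '('
    · simp [h1]; ring
    · by_cases h2 : a = ')'
      · simp [h2]; ring
      · simp [h1, h2]

-- ===== VERDICT (by name: the statement is the Claim_ definition above) =====
theorem check_bracket_balance_spec : Claim_equal_check_bracket_balance := by
  intro text _
  unfold Spec_check_bracket_balance check_bracket_balance check_bracket_balance_alt
  simp only [PySem.Str.count_eq]
  have h1 : ("(" : String).toList = ['('] := rfl
  have h2 : (")" : String).toList = [')'] := rfl
  rw [h1, h2, pv_count_single, pv_count_single, pv_fold_eq]
  ring
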